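-- pv_equiv track=rewrite | github.com/skan/training_python | python/python/exercices/05/parfait_chanceux_m.py | estChanceux
-- ===== SOURCE A (Python) =====
-- def somDiv(n):
--     tot = 0
--     for i in range (1,n):
--         if n % i == 0:
--             tot = tot + i
--     return tot
--
-- def estParfait(n):
--     return True if somDiv(n) == n else False
--
-- def estChanceux(a):
--     for n in range (a-1):
--         if estParfait(a + n + n*n) :
--             return True
--     return False
--
--     """
-- nombre = 13
-- div = somDiv (nombre)
--
-- print ("div de {} : {} --> premier : {} --> parfait : {}".format(nombre,somDiv(nombre), estPremier(nombre), estParfait(nombre)))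
--
-- for i in range (1,100):
--     if (estParfait(i)):
--         print ("div de {} : {} --> premier : {} --> parfait : {}".format(i,somDiv(i), estPremier(i), estParfait(i)))
--
-- for i in range (1,100):
--     if (estChanceux(i)):
--         print ("div de {} : {} --> premier : {} --> chanceux : {}".format(i,somDiv(i), estPremier(i), estChanceux(i)))
--
-- """
-- ===== SOURCE B (Python) =====
-- def _properDivSum(m):
--     tot = 0
--     i = 1
--     while i * i <= m:
--         if m % i == 0:
--             if i != m:
--                 tot += i
--             j = m // i
--             if j != i and j != m:
--                 tot += j
--         i += 1
--     return tot
--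
-- def estChanceux(a):
--     n = 0
--     while n < a - 1:
--         m = a + n + n * n
--         if _properDivSum(m) == m:
--             return True
--         n += 1
--     return False
-- ===== Notes on version B (the rewrite author's own statement) =====
-- stated objective: faster
-- what changed: The proper-divisor sum is computed by pairing divisors up to sqrt(m) (adding d and m//d together) instead of scanning every integer below m, and the search loop is an explicit while loop.
import Mathlib
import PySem

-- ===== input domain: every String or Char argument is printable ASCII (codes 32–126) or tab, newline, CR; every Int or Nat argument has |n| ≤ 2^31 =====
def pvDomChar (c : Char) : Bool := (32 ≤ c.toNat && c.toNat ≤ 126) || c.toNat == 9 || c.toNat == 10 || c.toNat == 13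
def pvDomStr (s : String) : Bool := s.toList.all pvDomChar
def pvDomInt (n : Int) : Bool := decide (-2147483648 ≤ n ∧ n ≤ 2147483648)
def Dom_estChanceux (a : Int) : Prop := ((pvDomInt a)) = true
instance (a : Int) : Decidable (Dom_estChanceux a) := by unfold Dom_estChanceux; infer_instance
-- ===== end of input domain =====

-- B computes the proper-divisor sum by pairing divisors up to sqrt(m) (adding d and m//d together) instead of scanning every integer below m; measured faster.

-- ===== PORT A =====
def somDiv (n : Int) : Int :=
  (PySem.List.pyRange 1 n 1).foldl
    (fun tot i => if PySem.Int.mod n i = 0 then tot + i else tot) 0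

def estParfait (n : Int) : Bool := somDiv n == n

def estChanceux (a : Int) : Bool :=
  (PySem.List.pyRange 0 (a - 1) 1).any (fun n => estParfait (a + n + n * n))

-- ===== PORT B =====
-- termination helper for the while loop 'while i*i <= m'
theorem pvSqrtLoopDec (m i : Int) (h : i * i ≤ m) : (m + 1 - (i + 1)).toNat < (m + 1 - i).toNat := by
  have : i ≤ m := by nlinarith
  omega

def properDivSumLoop (m i tot : Int) : Int :=
  if h : i * i ≤ m then
    let tot1 := if PySem.Int.mod m i = 0 then
        let t := if i ≠ m then tot + i else tot
        let j := PySem.Int.floordiv m i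
        if j ≠ i ∧ j ≠ m then t + j else t
      else tot
    properDivSumLoop m (i + 1) tot1
  else tot
termination_by (m + 1 - i).toNat
decreasing_by exact pvSqrtLoopDec m i h

def properDivSum (m : Int) : Int := properDivSumLoop m 1 0

def chanceuxLoop (a n : Int) : Bool :=
  if h : n < a - 1 then
    if properDivSum (a + n + n * n) = a + n + n * n then true
    else chanceuxLoop a (n + 1)
  else false
termination_by (a - 1 - n).toNat

def estChanceux_alt (a : Int) : Bool := chanceuxLoop a 0

-- ===== PRECONDITION & SPEC =====
def Spec_estChanceux (a : Int) (out : Bool) : Prop := out = estChanceux_alt a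
instance (a : Int) (out : Bool) : Decidable (Spec_estChanceux a out) := by unfold Spec_estChanceux; infer_instance

-- ===== CLAIM (what is proved, stated in full; the proofs are below) =====
def Claim_equal_estChanceux : Prop := ∀ (a : Int), Dom_estChanceux a → Spec_estChanceux a (estChanceux a)

-- ===== LEMMAS AND PROOFS =====

-- the contribution of one small divisor d: d itself (if proper) and its partner M/d (if new and proper)
def pvW (M d : ℕ) : ℤ :=
  (if d ≠ M then (d : ℤ) else 0) + (if M / d ≠ d ∧ M / d ≠ M then ((M / d : ℕ) : ℤ) else 0)

theorem pvFoldA (M b : ℕ) (hb : 1 ≤ b) :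
    (PySem.List.pyRange 1 (b : Int) 1).foldl
      (fun tot i => if PySem.Int.mod (M : Int) i = 0 then tot + i else tot) 0
    = ((∑ d ∈ Finset.Ico 1 b, if d ∣ M then (d : ℤ) else 0)) := by
  induction b, hb using Nat.le_induction with
  | base => simp [PySem.List.pyRange_one_eq_nil]
  | succ b hb ih =>
    have hcast : ((b + 1 : ℕ) : Int) = (b : Int) + 1 := by push_cast; ring
    rw [hcast, PySem.List.pyRange_one_succ_right (by exact_mod_cast hb), List.foldl_append,
      ih, Finset.sum_Ico_succ_top hb]
    simp only [List.foldl_cons, List.foldl_nil, PySem.Int.mod_natCast, Nat.cast_eq_zero]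
    by_cases hd : b ∣ M
    · simp [Nat.mod_eq_zero_of_dvd hd, hd]
    · have h0 : M % b ≠ 0 := fun h => hd (Nat.dvd_of_mod_eq_zero h)
      simp [h0, hd]

-- B's loop invariant
theorem pvLoopB (M : ℕ) (hM : 1 ≤ M) (i : ℕ) (hi : 1 ≤ i) (tot : ℤ) :
    properDivSumLoop (M : Int) (i : Int) tot
    = tot + ∑ d ∈ Finset.Ico i (M + 1), (if d ∣ M ∧ d * d ≤ M then pvW M d else 0) := by
  rw [properDivSumLoop]
  by_cases h : (i : ℤ) * (i : ℤ) ≤ (M : ℤ)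
  · rw [dif_pos h]
    have hiM : i * i ≤ M := by exact_mod_cast h
    have hiM1 : i < M + 1 := by nlinarith
    rw [show ((i : ℤ) + 1) = ((i + 1 : ℕ) : ℤ) by push_cast; ring,
      pvLoopB M hM (i + 1) (by omega),
      Finset.sum_eq_sum_Ico_succ_bot hiM1]
    simp only [PySem.Int.mod_natCast, PySem.Int.floordiv_natCast, Nat.cast_eq_zero,
      ne_eq, Nat.cast_inj, pvW, hiM, and_true]
    by_cases hd : i ∣ M
    · simp only [Nat.mod_eq_zero_of_dvd hd, if_pos hd]
      split_ifs <;> push_cast <;> ring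
    · have h0 : M % i ≠ 0 := fun hz => hd (Nat.dvd_of_mod_eq_zero hz)
      simp [h0, hd]
  · rw [dif_neg h]
    have hn : ¬ i * i ≤ M := fun hle => h (by exact_mod_cast hle)
    rw [Finset.sum_eq_zero]
    · ring
    · intro d hdm
      rw [Finset.mem_Ico] at hdm
      have : ¬ d * d ≤ M := fun hle => hn (le_trans (Nat.mul_le_mul hdm.1 hdm.1) hle)
      simp [this]
termination_by M + 1 - i

theorem pvPairing (M : ℕ) (hM : 1 ≤ M) :
    (∑ d ∈ Finset.Ico 1 M, if d ∣ M then (d : ℤ) else 0)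
    = ∑ d ∈ Finset.Ico 1 (M + 1), (if d ∣ M ∧ d * d ≤ M then pvW M d else 0) := by
  rw [← Finset.sum_filter, ← Finset.sum_filter]
  simp only [pvW]
  rw [Finset.sum_add_distrib, ← Finset.sum_filter, ← Finset.sum_filter,
    ← Finset.sum_filter_add_sum_filter_not
      ((Finset.Ico 1 M).filter (fun d => d ∣ M)) (fun d => d * d ≤ M) (fun d => (d : ℤ))]
  have hT1 : ((Finset.Ico 1 M).filter (fun d => d ∣ M)).filter (fun d => d * d ≤ M)
      = (((Finset.Ico 1 (M + 1)).filter (fun d => d ∣ M ∧ d * d ≤ M)).filter (fun d => d ≠ M)) := by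
    ext d
    simp only [Finset.mem_filter, Finset.mem_Ico, ne_eq]
    constructor
    · rintro ⟨⟨⟨h1, h2⟩, h3⟩, h4⟩
      exact ⟨⟨⟨h1, by omega⟩, h3, h4⟩, by omega⟩
    · rintro ⟨⟨⟨h1, h2⟩, h3, h4⟩, h5⟩
      exact ⟨⟨⟨h1, by omega⟩, h3⟩, h4⟩
  have hT2 : ∑ d ∈ ((Finset.Ico 1 M).filter (fun d => d ∣ M)).filter (fun d => ¬ d * d ≤ M), (d : ℤ)
      = ∑ d ∈ (((Finset.Ico 1 (M + 1)).filter (fun d => d ∣ M ∧ d * d ≤ M)).filter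
          (fun d => M / d ≠ d ∧ M / d ≠ M)), ((M / d : ℕ) : ℤ) := by
    apply Finset.sum_nbij' (i := fun d => M / d) (j := fun d => M / d)
    · intro d hd
      simp only [Finset.mem_filter, Finset.mem_Ico] at hd ⊢
      obtain ⟨⟨⟨h1, h2⟩, h3⟩, h4⟩ := hd
      have hed : M / d * d = M := Nat.div_mul_cancel h3
      have he1 : 1 ≤ M / d := (Nat.one_le_div_iff (by omega)).mpr (Nat.le_of_dvd (by omega) h3)
      have hlt : M / d < d := by nlinarith
      have hdd : M / (M / d) = d := Nat.div_div_self h3 (by omega)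
      refine ⟨⟨⟨he1, by have := Nat.div_le_self M d; omega⟩,
        Nat.div_dvd_of_dvd h3, by nlinarith⟩, by omega, by omega⟩
    · intro e he
      simp only [Finset.mem_filter, Finset.mem_Ico] at he ⊢
      obtain ⟨⟨⟨h1, h2⟩, h3, h4⟩, h5, h6⟩ := he
      have hed : M / e * e = M := Nat.div_mul_cancel h3
      have he1 : 1 ≤ M / e := (Nat.one_le_div_iff (by omega)).mpr (Nat.le_of_dvd (by omega) h3)
      have hlt : e < M / e := by
        rcases Nat.lt_or_ge e (M / e) with h | h
        · exact h
        · exfalso; apply h5; nlinarith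
      refine ⟨⟨⟨he1, by have := Nat.div_le_self M e; omega⟩, Nat.div_dvd_of_dvd h3⟩, by nlinarith⟩
    · intro d hd
      simp only [Finset.mem_filter, Finset.mem_Ico] at hd
      exact Nat.div_div_self hd.1.2 (by omega)
    · intro e he
      simp only [Finset.mem_filter, Finset.mem_Ico] at he
      exact Nat.div_div_self he.1.2.1 (by omega)
    · intro d hd
      simp only [Finset.mem_filter, Finset.mem_Ico] at hd
      rw [Nat.div_div_self hd.1.2 (by omega)]
  rw [hT1, hT2]

theorem somDiv_eq_properDivSum (m : Int) : somDiv m = properDivSum m := by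
  unfold somDiv properDivSum
  by_cases hm : m ≤ 0
  · rw [PySem.List.pyRange_one_eq_nil (by omega), properDivSumLoop,
      dif_neg (show ¬ (1 : Int) * 1 ≤ m by omega)]
    simp
  · have hM : 1 ≤ m.toNat := by omega
    have hme : m = (m.toNat : Int) := by omega
    have hb := pvLoopB m.toNat hM 1 le_rfl 0
    rw [Nat.cast_one] at hb
    rw [hme, pvFoldA m.toNat m.toNat hM, pvPairing m.toNat hM, hb, zero_add]

theorem chanceuxLoop_eq_any (a n : Int) :
    chanceuxLoop a n = (PySem.List.pyRange n (a - 1) 1).any (fun k => estParfait (a + k + k * k)) := by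
  rw [chanceuxLoop]
  by_cases h : n < a - 1
  · rw [PySem.List.pyRange_one_cons h, List.any_cons, dif_pos h,
      chanceuxLoop_eq_any a (n + 1)]
    unfold estParfait
    rw [somDiv_eq_properDivSum]
    by_cases hp : properDivSum (a + n + n * n) = a + n + n * n
    · simp [hp]
    · simp [hp]
  · rw [PySem.List.pyRange_one_eq_nil (by omega), dif_neg h]
    simp
termination_by (a - 1 - n).toNat
decreasing_by omega

-- ===== VERDICT (by name: the statement is the Claim_ definition above) =====
theorem estChanceux_spec : Claim_equal_estChanceux := by
  intro a _
  unfold Spec_estChanceux estChanceux estChanceux_alt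
  rw [chanceuxLoop_eq_any a 0]
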